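-- pv_equiv track=rewrite | github.com/reetamdutta1/Interview-Coding-Questions | Interview_Coding_Questions/sum of digits is pallindrome.py | isDigitSumPalindrome
-- ===== SOURCE A (Python) =====
-- def isDigitSumPalindrome(N):
--     newNum=0
--     #calculating Digit Sum
--     while(N>0):
--         newNum+=N%10
--         N//=10
--     reversedNewNum=0
--     N=newNum
--     #reversing newNum
--     while(N>0):
--         reversedNewNum=reversedNewNum*10+N%10
--         N//=10
--     return 1 if reversedNewNum==newNum else 0
-- ===== SOURCE B (Python) =====
-- def isDigitSumPalindrome(N):
--     newNum = 0
--     while N > 0: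
--         newNum += N % 10
--         N //= 10
--     s = str(newNum)
--     return 1 if s == s[::-1] else 0
-- ===== Notes on version B (the rewrite author's own statement) =====
-- stated objective: simpler
-- what changed: Drops A's second arithmetic integer-reversal loop and accumulator: after the digit sum, B tests palindromicity by comparing the decimal string of the sum with its reverse.
import Mathlib
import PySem

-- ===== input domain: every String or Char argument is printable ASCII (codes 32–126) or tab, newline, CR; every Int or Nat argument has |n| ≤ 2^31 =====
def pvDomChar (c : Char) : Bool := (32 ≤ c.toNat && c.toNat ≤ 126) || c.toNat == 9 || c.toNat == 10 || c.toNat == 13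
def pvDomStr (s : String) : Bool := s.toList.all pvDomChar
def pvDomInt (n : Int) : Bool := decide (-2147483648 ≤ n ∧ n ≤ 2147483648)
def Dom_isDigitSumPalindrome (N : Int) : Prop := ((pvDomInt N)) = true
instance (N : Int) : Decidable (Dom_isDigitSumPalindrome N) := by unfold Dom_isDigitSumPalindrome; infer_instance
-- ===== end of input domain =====

-- B drops A's second arithmetic integer-reversal loop: the palindrome test compares the decimal
-- string of the digit sum with its reverse (objective: simpler; same asymptotic cost).

-- ===== PORT A =====
-- while N > 0: newNum += N % 10; N //= 10   (fuel N.toNat bounds the iteration count: N shrinks by //10 each step)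
def pvDsGoA : Nat → Int → Int → Int
  | 0, _, acc => acc
  | fuel + 1, N, acc =>
      if 0 < N then pvDsGoA fuel (PySem.Int.floordiv N 10) (acc + PySem.Int.mod N 10) else acc

-- while N > 0: reversedNewNum = reversedNewNum*10 + N % 10; N //= 10
def pvRevGoA : Nat → Int → Int → Int
  | 0, _, rev => rev
  | fuel + 1, N, rev =>
      if 0 < N then pvRevGoA fuel (PySem.Int.floordiv N 10) (rev * 10 + PySem.Int.mod N 10) else rev

def isDigitSumPalindrome (N : Int) : Int :=
  let newNum := pvDsGoA N.toNat N 0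
  let reversedNewNum := pvRevGoA newNum.toNat newNum 0
  if reversedNewNum = newNum then 1 else 0

-- ===== PORT B =====
-- while N > 0: newNum += N % 10; N //= 10   (same fuel bound as in A's port)
def pvDsGoB : Nat → Int → Int → Int
  | 0, _, acc => acc
  | fuel + 1, N, acc =>
      if 0 < N then pvDsGoB fuel (PySem.Int.floordiv N 10) (acc + PySem.Int.mod N 10) else acc

def isDigitSumPalindrome_alt (N : Int) : Int :=
  let newNum := pvDsGoB N.toNat N 0
  let s := PySem.Int.toChars newNum      -- str(newNum), as its character list (toList of PySem.Int.toStr)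
  if s = s.reverse then 1 else 0         -- s == s[::-1]: the full step -1 slice is reversal; string equality compared char by char (exact)

-- ===== PRECONDITION & SPEC =====
def Spec_isDigitSumPalindrome (N : Int) (out : Int) : Prop := out = isDigitSumPalindrome_alt N
instance (N : Int) (out : Int) : Decidable (Spec_isDigitSumPalindrome N out) := by unfold Spec_isDigitSumPalindrome; infer_instance

-- ===== CLAIM (what is proved, stated in full; the proofs are below) =====
def Claim_equal_isDigitSumPalindrome : Prop := ∀ (N : Int), Dom_isDigitSumPalindrome N → Spec_isDigitSumPalindrome N (isDigitSumPalindrome N)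

-- ===== LEMMAS AND PROOFS =====

-- the two digit-sum loops are the same program
lemma pvDsGoB_eq (fuel : Nat) : ∀ N acc : Int, pvDsGoB fuel N acc = pvDsGoA fuel N acc := by
  induction fuel with
  | zero => intro N acc; rfl
  | succ f ih =>
      intro N acc
      simp only [pvDsGoB, pvDsGoA]
      split <;> simp [ih]

-- accumulator normalisation
lemma pvDsGoA_acc (fuel : Nat) : ∀ N acc : Int, pvDsGoA fuel N acc = acc + pvDsGoA fuel N 0 := by
  induction fuel with
  | zero => intro N acc; simp [pvDsGoA]
  | succ f ih =>
      intro N acc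
      simp only [pvDsGoA]
      split
      · rw [ih _ (acc + PySem.Int.mod N 10), ih _ (0 + PySem.Int.mod N 10)]
        ring
      · simp

lemma pvDsGoA_nonneg (fuel : Nat) : ∀ N : Int, 0 ≤ pvDsGoA fuel N 0 := by
  induction fuel with
  | zero => intro N; simp [pvDsGoA]
  | succ f ih =>
      intro N
      simp only [pvDsGoA]
      split
      · rw [pvDsGoA_acc]
        have := PySem.Int.mod_nonneg N (b := 10) (by norm_num)
        have := ih (PySem.Int.floordiv N 10)
        omega
      · simp

-- each digit contributes ≤ 9: a number below 10^k has digit sum ≤ 9k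
lemma pvDsGoA_le (fuel : Nat) : ∀ (k : Nat) (N : Int), N < 10 ^ k → pvDsGoA fuel N 0 ≤ 9 * k := by
  induction fuel with
  | zero => intro k N _; simp [pvDsGoA]
  | succ f ih =>
      intro k N hN
      simp only [pvDsGoA]
      split
      · rename_i hpos
        rw [pvDsGoA_acc]
        cases k with
        | zero => simp at hN; omega
        | succ k' =>
            have hdiv : PySem.Int.floordiv N 10 < 10 ^ k' := by
              rw [PySem.Int.floordiv_lt_iff_lt_mul (by norm_num)]
              calc N < 10 ^ (k' + 1) := hN
                _ = 10 ^ k' * 10 := by ring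
            have h1 := ih k' (PySem.Int.floordiv N 10) hdiv
            have h2 := PySem.Int.mod_lt N (b := 10) (by norm_num)
            push_cast
            omega
      · simp

-- the arithmetic reversal test and the string-palindrome test agree on every possible digit sum
lemma pvCore : ∀ m : Nat, m < 91 →
    (if pvRevGoA ((m : Int).toNat) (m : Int) 0 = (m : Int) then (1 : Int) else 0) =
    (if PySem.Int.toChars (m : Int) = (PySem.Int.toChars (m : Int)).reverse then (1 : Int) else 0) := by
  decide

-- ===== VERDICT (by name: the statement is the Claim_ definition above) =====
theorem isDigitSumPalindrome_spec : Claim_equal_isDigitSumPalindrome := by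
  intro N hdom
  unfold Spec_isDigitSumPalindrome isDigitSumPalindrome isDigitSumPalindrome_alt
  simp only [pvDsGoB_eq]
  set m := pvDsGoA N.toNat N 0 with hm
  have h0 : 0 ≤ m := pvDsGoA_nonneg _ _
  have h90 : m ≤ 90 := by
    have hN : N < 10 ^ 10 := by
      unfold Dom_isDigitSumPalindrome pvDomInt at hdom
      simp at hdom
      omega
    have := pvDsGoA_le N.toNat 10 N hN
    omega
  have hcast : ((m.toNat : Nat) : Int) = m := Int.toNat_of_nonneg h0
  have := pvCore m.toNat (by omega)
  rw [hcast] at this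
  exact this
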